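-- pv_equiv track=rewrite | github.com/vv-work/LeetCode2Paper | scripts/sync_leetcode75.py | extract_python_only
-- ===== SOURCE A (Python) =====
-- def extract_python_only(md: str) -> str:
--     # Keep everything except language tabs that are not Python3/Python.
--     # Prefer Python3 section if present; else Python.
--     # Strategy: if tabs present, capture Python3 section including its code block(s), remove others.
--     lines = md.splitlines()
--     out = []
--     in_tabs = False
--     keep_mode = None  # None or 'py'
--     i = 0
--     has_tabs = any("<!-- tabs:start -->" in line for line in lines)
--
--     if not has_tabs:
--         return md  # nothing to slim
--
--     # We will copy everything up to tabs:start, then only the Python section, then tabs:end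
--     while i < len(lines):
--         line = lines[i]
--         if "<!-- tabs:start -->" in line:
--             in_tabs = True
--             out.append(line)
--             i += 1
--             # scan to find Python3 header index; if not, 'Python'
--             # Then when encountered other sections, skip until next '#### ' or tabs:end
--             while i < len(lines):
--                 if lines[i].startswith("#### "):
--                     header = lines[i][5:].strip()
--                     # exact matches used by doocs: 'Python3', 'Python'
--                     if header in ("Python3", "Python") and keep_mode is None:
--                         keep_mode = 'py'
--                         # write the header and subsequent lines until next header or tabs:end
--                         out.append(lines[i])
--                         i += 1
--                         while i < len(lines) and not lines[i].startswith("#### ") and "<!-- tabs:end -->" not in lines[i]: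
--                             out.append(lines[i])
--                             i += 1
--                         # do not break: we need to continue to reach tabs:end to append it
--                         continue
--                     else:
--                         # skip this section
--                         i += 1
--                         while i < len(lines) and not lines[i].startswith("#### ") and "<!-- tabs:end -->" not in lines[i]:
--                             i += 1
--                         continue
--                 elif "<!-- tabs:end -->" in lines[i]:
--                     out.append(lines[i])
--                     i += 1
--                     break
--                 else:
--                     # lines between tabs:start and first header — usually none
--                     i += 1
--             # after finishing tabs, continue copying the rest of the doc
--             continue
--         else:
--             out.append(line)
--             i += 1
--     return "\n".join(out) + ("\n" if not out or not out[-1].endswith("\n") else "")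
-- ===== SOURCE B (Python) =====
-- TABS_START = "<!-- tabs:start -->"
-- TABS_END = "<!-- tabs:end -->"
--
--
-- def extract_python_only(md: str) -> str:
--     """Single forward pass: a small state machine over the lines instead of
--     nested scanning loops."""
--     lines = md.splitlines()
--     if not any(TABS_START in line for line in lines):
--         return md  # nothing to slim
--
--     OUTSIDE, SCAN, EMIT, SKIP = 0, 1, 2, 3
--     state = OUTSIDE
--     kept_python = False  # latched: only the first Python/Python3 section survives
--     out = []
--     for line in lines:
--         if state == OUTSIDE:
--             if TABS_START in line:
--                 state = SCAN
--             out.append(line)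
--         elif line.startswith("#### "):
--             header = line[5:].strip()
--             if header in ("Python3", "Python") and not kept_python:
--                 kept_python = True
--                 state = EMIT
--                 out.append(line)
--             else:
--                 state = SKIP
--         elif TABS_END in line:
--             state = OUTSIDE
--             out.append(line)
--         elif state == EMIT:
--             out.append(line)
--         # SCAN / SKIP: drop the line
--     return "\n".join(out) + "\n"
-- ===== Notes on version B (the rewrite author's own statement) =====
-- stated objective: simpler
-- what changed: Replaced A's nested while-loops (an outer copy loop with an inner tabs-block scanner containing separate copy/skip sub-loops and manual index bookkeeping) by a single forward for-loop over the lines driven by an explicit 4-state machine (outside / scanning / emitting / skipping) with a latched kept-python flag.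
import Mathlib
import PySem

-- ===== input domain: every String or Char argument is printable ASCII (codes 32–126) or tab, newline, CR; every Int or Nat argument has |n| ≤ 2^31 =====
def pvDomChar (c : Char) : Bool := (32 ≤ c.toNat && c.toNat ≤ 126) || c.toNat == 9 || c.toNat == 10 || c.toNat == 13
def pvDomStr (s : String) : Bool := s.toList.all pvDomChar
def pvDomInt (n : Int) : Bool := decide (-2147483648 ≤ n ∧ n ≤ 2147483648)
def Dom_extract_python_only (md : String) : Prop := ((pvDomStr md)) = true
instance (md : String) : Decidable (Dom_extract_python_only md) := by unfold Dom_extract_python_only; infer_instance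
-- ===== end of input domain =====

-- B replaces A's nested scanning while-loops by one forward pass with an explicit
-- state machine over the lines (objective: simpler).

-- shared line predicates (both Pythons test the same literals)
def pvTabsStart (l : String) : Bool := PySem.Str.isIn "<!-- tabs:start -->" l
def pvTabsEnd (l : String) : Bool := PySem.Str.isIn "<!-- tabs:end -->" l
def pvIsHeader (l : String) : Bool := PySem.Str.startswith l "#### "
def pvHeaderOf (l : String) : String := PySem.Str.strip (PySem.Str.slice l (some 5) none)
def pvIsPyHeader (l : String) : Bool := pvHeaderOf l == "Python3" || pvHeaderOf l == "Python"

-- ===== PORT A =====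
-- A's inner copy loop: emit lines until the next '#### ' header or a tabs:end line
def aCopy : List String → List String × List String
  | [] => ([], [])
  | l :: rest =>
    if !pvIsHeader l && !pvTabsEnd l then
      let cr := aCopy rest
      (l :: cr.1, cr.2)
    else ([], l :: rest)

-- A's inner skip loop: drop lines until the next '#### ' header or a tabs:end line
def aSkip : List String → List String
  | [] => []
  | l :: rest => if !pvIsHeader l && !pvTabsEnd l then aSkip rest else l :: rest

theorem aCopy_suffix (ls : List String) : (aCopy ls).2 <:+ ls := by
  induction ls with
  | nil => simp [aCopy]
  | cons l rest ih =>
    simp only [aCopy]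
    split
    · exact ih.trans (List.suffix_cons l rest)
    · exact List.suffix_refl _

theorem aSkip_suffix (ls : List String) : aSkip ls <:+ ls := by
  induction ls with
  | nil => simp [aSkip]
  | cons l rest ih =>
    simp only [aSkip]
    split
    · exact ih.trans (List.suffix_cons l rest)
    · exact List.suffix_refl _

-- A's inner while-loop (from just after a tabs:start line): returns the lines it
-- emits, the remaining lines after the tabs block, and the keep_mode latch
def aInner : List String → Bool → List String × List String × Bool
  | [], keep => ([], [], keep)
  | l :: rest, keep =>
    if pvIsHeader l then
      if pvIsPyHeader l && !keep then
        let cr := aCopy rest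
        let ir := aInner cr.2 true
        (l :: (cr.1 ++ ir.1), ir.2.1, ir.2.2)
      else
        aInner (aSkip rest) keep
    else if pvTabsEnd l then ([l], rest, keep)
    else aInner rest keep
  termination_by ls _ => ls.length
  decreasing_by
  · have := (aCopy_suffix rest).length_le; simp at *; omega
  · have := (aSkip_suffix rest).length_le; simp at *; omega
  · simp

theorem aInner_suffix (ls : List String) (keep : Bool) : (aInner ls keep).2.1 <:+ ls := by
  fun_induction aInner with
  | case1 keep => simp
  | case2 l rest keep hh hp cr ir ih =>
    exact ih.trans ((aCopy_suffix rest).trans (List.suffix_cons l rest))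
  | case3 l rest keep hh hp ih =>
    exact ih.trans ((aSkip_suffix rest).trans (List.suffix_cons l rest))
  | case4 l rest keep hh ht => exact List.suffix_cons l rest
  | case5 l rest keep hh ht ih => exact ih.trans (List.suffix_cons l rest)

-- A's outer while-loop: copy everything outside tabs blocks, process each block
def aOuter : List String → Bool → List String
  | [], _ => []
  | l :: rest, keep =>
    if pvTabsStart l then
      let ir := aInner rest keep
      l :: (ir.1 ++ aOuter ir.2.1 ir.2.2)
    else l :: aOuter rest keep
  termination_by ls _ => ls.length
  decreasing_by
  · have := (aInner_suffix rest keep).length_le; simp at *; omega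
  · simp

def extract_python_only (md : String) : String :=
  let lines := PySem.Str.splitlines md
  if !(lines.any pvTabsStart) then md
  else
    let out := aOuter lines false
    PySem.Str.join "\n" out ++
      (if out.isEmpty || !(PySem.Str.endswith ((PySem.List.pyGet? out (-1)).getD "") "\n")
       then "\n" else "")

-- ===== PORT B =====
-- Source B's state machine step: state (0 outside, 1 scanning, 2 emitting python, 3
-- skipping a section), the kept_python latch, and the output accumulator
def bStep (st : Nat × Bool × List String) (l : String) : Nat × Bool × List String :=
  let s := st.1; let keep := st.2.1; let acc := st.2.2
  if s == 0 then
    (if pvTabsStart l then 1 else 0, keep, l :: acc)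
  else if pvIsHeader l then
    if pvIsPyHeader l && !keep then (2, true, l :: acc) else (3, keep, acc)
  else if pvTabsEnd l then (0, keep, l :: acc)
  else if s == 2 then (2, keep, l :: acc)
  else (s, keep, acc)

def extract_python_only_alt (md : String) : String :=
  let lines := PySem.Str.splitlines md
  if !(lines.any pvTabsStart) then md
  else PySem.Str.join "\n" ((lines.foldl bStep (0, false, [])).2.2.reverse) ++ "\n"

-- ===== PRECONDITION & SPEC =====
def Spec_extract_python_only (md : String) (out : String) : Prop := out = extract_python_only_alt md
instance (md : String) (out : String) : Decidable (Spec_extract_python_only md out) := by unfold Spec_extract_python_only; infer_instance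

-- ===== CLAIM (what is proved, stated in full; the proofs are below) =====
def Claim_equal_extract_python_only : Prop := ∀ (md : String), Dom_extract_python_only md → Spec_extract_python_only md (extract_python_only md)

-- ===== LEMMAS AND PROOFS =====

theorem aSkip_eq (ls : List String) : aSkip ls = (aCopy ls).2 := by
  induction ls with
  | nil => simp [aSkip, aCopy]
  | cons l rest ih => simp only [aSkip, aCopy]; split <;> simp [ih]

-- the remainder of a copy/skip loop is [] or starts with a stop line
theorem aCopy_rem (ls : List String) :
    (aCopy ls).2 = [] ∨ ∃ l rest, (aCopy ls).2 = l :: rest ∧ (pvIsHeader l || pvTabsEnd l) = true := by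
  induction ls with
  | nil => left; simp [aCopy]
  | cons l rest ih =>
    simp only [aCopy]
    split
    · exact ih
    · right; refine ⟨l, rest, rfl, ?_⟩
      rename_i h
      simp only [Bool.and_eq_true, Bool.not_eq_true'] at h
      cases hh : pvIsHeader l <;> cases ht : pvTabsEnd l <;> simp_all

-- on a stop line bStep ignores the (nonzero) state
theorem bStep_stop {s : Nat} (hs : s ≠ 0) {l : String} (h : (pvIsHeader l || pvTabsEnd l) = true)
    (k : Bool) (acc : List String) : bStep (s, k, acc) l = bStep (1, k, acc) l := by
  simp only [bStep]
  have : (s == 0) = false := by simp [hs]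
  rcases Bool.or_eq_true _ _ |>.mp h with hh | ht
  · simp [this, hh]
  · by_cases hh : pvIsHeader l = true <;> simp [this, hh, ht]

theorem foldl_stop {s : Nat} (hs : s ≠ 0) (rem : List String)
    (hrem : rem = [] ∨ ∃ l rest, rem = l :: rest ∧ (pvIsHeader l || pvTabsEnd l) = true)
    (k : Bool) (acc : List String) :
    (List.foldl bStep (s, k, acc) rem).2.2 = (List.foldl bStep (1, k, acc) rem).2.2 := by
  rcases hrem with h | ⟨l, rest, rfl, h⟩
  · subst h; rfl
  · simp only [List.foldl_cons, bStep_stop hs h]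

-- state 2 over ls = copy the aCopy prefix, then continue from the remainder
theorem copy_fold (ls : List String) (k : Bool) (acc : List String) :
    List.foldl bStep (2, k, acc) ls
      = List.foldl bStep (2, k, (aCopy ls).1.reverse ++ acc) (aCopy ls).2 := by
  induction ls generalizing acc with
  | nil => simp [aCopy]
  | cons l rest ih =>
    simp only [aCopy]
    split
    · rename_i h
      simp only [Bool.and_eq_true, Bool.not_eq_true'] at h
      have hstep : bStep (2, k, acc) l = (2, k, l :: acc) := by
        simp [bStep, h.1, h.2]
      simp only [List.foldl_cons, hstep, ih, List.reverse_cons]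
      simp
    · simp

-- state 3 over ls = drop the aSkip prefix, then continue from the remainder
theorem skip_fold (ls : List String) (k : Bool) (acc : List String) :
    List.foldl bStep (3, k, acc) ls = List.foldl bStep (3, k, acc) (aSkip ls) := by
  induction ls with
  | nil => simp [aSkip]
  | cons l rest ih =>
    simp only [aSkip]
    split
    · rename_i h
      simp only [Bool.and_eq_true, Bool.not_eq_true'] at h
      have hstep : bStep (3, k, acc) l = (3, k, acc) := by
        simp [bStep, h.1, h.2]
      simp only [List.foldl_cons, hstep, ih]
    · simp

-- the two main invariants, by strong induction on the number of lines
theorem main_fold (n : Nat) : ∀ ls : List String, ls.length ≤ n →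
    (∀ (k : Bool) (acc : List String),
      (List.foldl bStep (0, k, acc) ls).2.2 = (aOuter ls k).reverse ++ acc) ∧
    (∀ (k : Bool) (acc : List String),
      (List.foldl bStep (1, k, acc) ls).2.2
        = (aOuter (aInner ls k).2.1 (aInner ls k).2.2).reverse ++ (aInner ls k).1.reverse ++ acc) := by
  induction n with
  | zero =>
    intro ls hls
    have : ls = [] := List.eq_nil_of_length_eq_zero (Nat.le_zero.mp hls)
    subst this
    constructor <;> intro k acc <;> simp [aOuter, aInner]
  | succ n ih =>
    intro ls hls
    constructor
    · -- C0
      intro k acc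
      cases ls with
      | nil => simp [aOuter]
      | cons l rest =>
        simp only [List.length_cons, Nat.succ_le_succ_iff] at hls
        simp only [aOuter, List.foldl_cons]
        by_cases hts : pvTabsStart l = true
        · have hstep : bStep (0, k, acc) l = (1, k, l :: acc) := by simp [bStep, hts]
          simp only [hts, if_pos, hstep]
          rw [(ih rest hls).2 k (l :: acc)]
          simp
        · have hstep : bStep (0, k, acc) l = (0, k, l :: acc) := by
            simp [bStep, hts]
          simp only [hts, if_neg, hstep]
          rw [(ih rest hls).1 k (l :: acc)]
          simp
    · -- C1
      intro k acc
      cases ls with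
      | nil => simp [aInner, aOuter]
      | cons l rest =>
        simp only [List.length_cons, Nat.succ_le_succ_iff] at hls
        simp only [aInner, List.foldl_cons]
        by_cases hh : pvIsHeader l = true
        · by_cases hp : (pvIsPyHeader l && !k) = true
          · -- python header: emit, go to state 2
            have hstep : bStep (1, k, acc) l = (2, true, l :: acc) := by
              simp [bStep, hh, hp]
            simp only [hh, hp, if_pos, hstep]
            rw [copy_fold rest true (l :: acc)]
            have hrem := aCopy_rem rest
            have hlen : (aCopy rest).2.length ≤ n := (aCopy_suffix rest).length_le.trans hls
            rw [foldl_stop (by norm_num) _ hrem]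
            rw [(ih _ hlen).2 true ((aCopy rest).1.reverse ++ (l :: acc))]
            simp
          · -- other header: skip, go to state 3
            have hstep : bStep (1, k, acc) l = (3, k, acc) := by
              simp only [bStep]
              simp [hh, hp]
            simp only [hh, hp, if_pos, if_neg, hstep]
            rw [skip_fold rest k acc, aSkip_eq]
            have hrem := aCopy_rem rest
            have hlen : (aCopy rest).2.length ≤ n := (aCopy_suffix rest).length_le.trans hls
            rw [foldl_stop (by norm_num) _ hrem]
            rw [(ih _ hlen).2 k acc]
            rw [← aSkip_eq]
            simp
        · by_cases ht : pvTabsEnd l = true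
          · have hstep : bStep (1, k, acc) l = (0, k, l :: acc) := by
              simp [bStep, hh, ht]
            simp only [hh, ht, if_neg, if_pos, hstep]
            rw [(ih rest hls).1 k (l :: acc)]
            simp
          · have hstep : bStep (1, k, acc) l = (1, k, acc) := by
              simp [bStep, hh, ht]
            simp only [hh, ht, if_neg, hstep]
            exact (ih rest hls).2 k acc

-- every line A emits is one of the input lines
theorem aCopy_mem (ls : List String) : ∀ l ∈ (aCopy ls).1, l ∈ ls := by
  induction ls with
  | nil => simp [aCopy]
  | cons x rest ih =>
    simp only [aCopy]
    split
    · intro l hl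
      rcases List.mem_cons.mp hl with h | h
      · simp [h]
      · exact List.mem_cons_of_mem _ (ih l h)
    · simp

theorem aInner_mem (ls : List String) (keep : Bool) : ∀ l ∈ (aInner ls keep).1, l ∈ ls := by
  fun_induction aInner with
  | case1 keep => simp
  | case2 x rest keep hh hp cr ir ih =>
    intro l hl
    simp only [List.mem_cons, List.mem_append] at hl
    rcases hl with h | h | h
    · simp [h]
    · exact List.mem_cons_of_mem _ (aCopy_mem rest l h)
    · exact List.mem_cons_of_mem _ ((aCopy_suffix rest).subset (ih l h))
  | case3 x rest keep hh hp ih =>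
    intro l hl
    exact List.mem_cons_of_mem _ ((aSkip_suffix rest).subset (ih l hl))
  | case4 x rest keep hh ht => simp
  | case5 x rest keep hh ht ih =>
    intro l hl
    exact List.mem_cons_of_mem _ (ih l hl)

theorem aOuter_mem (ls : List String) (keep : Bool) : ∀ l ∈ aOuter ls keep, l ∈ ls := by
  fun_induction aOuter with
  | case1 keep => simp
  | case2 x rest keep hts ir ih =>
    intro l hl
    simp only [List.mem_cons, List.mem_append] at hl
    rcases hl with h | h | h
    · simp [h]
    · exact List.mem_cons_of_mem _ (aInner_mem rest keep l h)
    · exact List.mem_cons_of_mem _ ((aInner_suffix rest keep).subset (ih l h))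
  | case3 x rest keep hts ih =>
    intro l hl
    rcases List.mem_cons.mp hl with h | h
    · simp [h]
    · exact List.mem_cons_of_mem _ (ih l h)

-- splitlines pieces contain no break character (in particular no '\n')
theorem splitlines_go_no_break (isB : Char → Bool) :
    ∀ (s cur : List Char) (acc : List (List Char)),
    (∀ c ∈ cur, isB c = false) → (∀ p ∈ acc, ∀ c ∈ p, isB c = false) →
    ∀ p ∈ PySem.Chars.splitlines.go isB s cur acc, ∀ c ∈ p, isB c = false := by
  intro s cur acc
  fun_induction PySem.Chars.splitlines.go isB s cur acc with
  | case1 cur acc h =>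
    intro hcur hacc p hp
    rw [List.mem_reverse] at hp
    exact hacc p hp
  | case2 cur acc h =>
    intro hcur hacc p hp
    rw [List.mem_reverse] at hp
    rcases List.mem_cons.mp hp with h' | h'
    · intro c hc; rw [h'] at hc; rw [List.mem_reverse] at hc; exact hcur c hc
    · exact hacc p h'
  | case3 rest cur acc ih =>
    intro hcur hacc p hp
    refine ih (by simp) ?_ p hp
    intro q hq
    rcases List.mem_cons.mp hq with h' | h'
    · intro d hd; rw [h'] at hd; rw [List.mem_reverse] at hd; exact hcur d hd
    · exact hacc q h'
  | case4 c rest cur acc hnc hB ih =>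
    intro hcur hacc p hp
    refine ih (by simp) ?_ p hp
    intro q hq
    rcases List.mem_cons.mp hq with h' | h'
    · intro d hd; rw [h'] at hd; rw [List.mem_reverse] at hd; exact hcur d hd
    · exact hacc q h'
  | case5 c rest cur acc hnc hB ih =>
    intro hcur hacc p hp
    refine ih ?_ hacc p hp
    intro d hd
    rcases List.mem_cons.mp hd with h' | h'
    · rw [h']; simpa using hB
    · exact hcur d h'

theorem splitlines_no_nl (md : String) : ∀ l ∈ PySem.Str.splitlines md, PySem.Str.endswith l "\n" = false := by
  intro l hl
  unfold PySem.Str.splitlines PySem.Chars.splitlines at hl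
  simp only [List.mem_map] at hl
  obtain ⟨cs, hcs, rfl⟩ := hl
  have hno : ∀ c ∈ cs, ('\n' : Char) ≠ c := by
    intro c hc hEq
    have := splitlines_go_no_break _ _ [] [] (by simp) (by simp) cs hcs c hc
    rw [← hEq] at this
    simp at this
  have hnl : ('\n' : Char) ∉ cs := fun h => hno _ h rfl
  have : PySem.Chars.endswith (String.ofList cs).toList ("\n" : String).toList = false := by
    rw [Bool.eq_false_iff]
    intro hE
    have hsuf := (PySem.Chars.endswith_iff _ _).mp hE
    have : ('\n' : Char) ∈ (String.ofList cs).toList := hsuf.subset (by decide)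
    simp at this
    exact hnl this
  simpa using this

-- ===== VERDICT (by name: the statement is the Claim_ definition above) =====
theorem extract_python_only_spec : Claim_equal_extract_python_only := by
  intro md _
  unfold Spec_extract_python_only extract_python_only extract_python_only_alt
  simp only
  by_cases h : (PySem.Str.splitlines md).any pvTabsStart = true
  · simp only [h, Bool.not_true, Bool.false_eq_true, if_false]
    -- the emitted line lists agree
    have hout : ((PySem.Str.splitlines md).foldl bStep (0, false, [])).2.2.reverse
        = aOuter (PySem.Str.splitlines md) false := by
      rw [(main_fold (PySem.Str.splitlines md).length _ le_rfl).1 false []]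
      simp
    rw [hout]
    -- A's trailing-newline test always yields "\n": no splitlines piece ends in '\n'
    congr 1
    rcases hE : aOuter (PySem.Str.splitlines md) false with _ | ⟨x, xs⟩
    · simp
    · have hlast : (PySem.List.pyGet? (x :: xs) (-1)).getD "" ∈ x :: xs := by
        have h1 : PySem.List.pyGet? (x :: xs) (-1) = some ((x :: xs).getLast (by simp)) := by
          simp only [PySem.List.pyGet?, PySem.List.pyIdx?, List.getLast_eq_getElem]
          norm_num
          rfl
        rw [h1]
        exact List.getLast_mem _
      have hmem : (PySem.List.pyGet? (x :: xs) (-1)).getD "" ∈ PySem.Str.splitlines md := by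
        have := aOuter_mem (PySem.Str.splitlines md) false
        rw [hE] at this
        exact this _ hlast
      rw [splitlines_no_nl md _ hmem]
      simp
  · simp [h]
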